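-- pv_equiv track=rewrite | github.com/Vadim200116/Codewars | 6kyu/simple_encryption.py | decrypt
-- ===== SOURCE A (Python) =====
-- def decrypt(text, n):
--     if text in ("", None):
--         return text
--
--     ndx = len(text) // 2
--
--     for i in range(n):
--         a = text[:ndx]
--         b = text[ndx:]
--         text = "".join(b[i:i+1] + a[i:i+1] for i in range(ndx + 1))
--     return text
-- ===== SOURCE B (Python) =====
-- def decrypt(text, n):
--     if not text:
--         return text
--     L = len(text)
--     ndx = L // 2
--     # one decryption step moves char at position (ndx + j//2 if j even else j//2) to position j;
--     # compute that permutation raised to the n-th power by repeated squaring, then apply it once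
--     base = [ndx + j // 2 if j % 2 == 0 else j // 2 for j in range(L)]
--     q = list(range(L))
--     m = max(n, 0)
--     while m:
--         if m & 1:
--             q = [base[i] for i in q]
--         base = [base[i] for i in base]
--         m >>= 1
--     return "".join(text[i] for i in q)
-- ===== Notes on version B (the rewrite author's own statement) =====
-- stated objective: faster
-- what changed: B computes the fixed one-step position permutation once and raises it to the n-th power by repeated squaring of index arrays, applying it to the text a single time, instead of rebuilding the string n times from slices.
import Mathlib
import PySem

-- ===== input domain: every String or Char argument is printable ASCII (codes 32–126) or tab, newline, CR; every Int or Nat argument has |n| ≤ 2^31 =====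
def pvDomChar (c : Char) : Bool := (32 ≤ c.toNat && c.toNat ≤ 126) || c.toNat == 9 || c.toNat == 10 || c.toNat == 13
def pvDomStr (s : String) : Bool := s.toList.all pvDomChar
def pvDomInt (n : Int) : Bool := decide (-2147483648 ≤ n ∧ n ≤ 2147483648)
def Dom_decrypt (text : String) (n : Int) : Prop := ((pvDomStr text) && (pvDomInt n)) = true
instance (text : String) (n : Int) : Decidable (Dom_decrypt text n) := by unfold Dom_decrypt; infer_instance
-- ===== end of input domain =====

-- B replaces A's n-fold slice-and-join rebuilding of the string by one application of the
-- one-step position permutation raised to the n-th power via repeated squaring (objective: faster).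


-- ===== PORT A =====
-- one pass of A's loop body: a = text[:ndx]; b = text[ndx:]; "".join(b[i:i+1] + a[i:i+1] for i in range(ndx+1))
def decryptStep (ndx : Int) (t : List Char) : List Char :=
  let a := PySem.List.slice t none (some ndx)
  let b := PySem.List.slice t (some ndx) none
  (PySem.List.pyRange 0 (ndx + 1) 1).flatMap (fun i =>
    PySem.List.slice b (some i) (some (i + 1)) ++ PySem.List.slice a (some i) (some (i + 1)))

def decrypt (text : String) (n : Int) : String :=
  if text = "" then text
  else
    let ndx : Int := PySem.Int.floordiv (PySem.Str.len text) 2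
    String.ofList ((PySem.List.pyRange 0 n 1).foldl (fun t _ => decryptStep ndx t) text.toList)

-- ===== PORT B =====
-- [base[i] for i in q]
def composeArr (base q : List Nat) : List Nat := q.map (fun i => base.getD i 0)

-- the while-loop of Source B: repeated squaring of the permutation array
def binExp (base q : List Nat) (m : Nat) : List Nat :=
  if m = 0 then q
  else binExp (composeArr base base) (if m % 2 = 1 then composeArr base q else q) (m / 2)

def decrypt_alt (text : String) (n : Int) : String :=
  if text = "" then text
  else
    let t := text.toList
    let L := t.length
    let ndx := L / 2
    let base := (List.range L).map (fun j => if j % 2 = 0 then ndx + j / 2 else j / 2)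
    let q := binExp base (List.range L) n.toNat
    String.ofList (q.map (fun i => t.getD i ' '))

-- ===== PRECONDITION & SPEC =====
def Spec_decrypt (text : String) (n : Int) (out : String) : Prop := out = decrypt_alt text n
instance (text : String) (n : Int) (out : String) : Decidable (Spec_decrypt text n out) := by unfold Spec_decrypt; infer_instance

-- ===== CLAIM (what is proved, stated in full; the proofs are below) =====
def Claim_equal_decrypt : Prop := ∀ (text : String) (n : Int), Dom_decrypt text n → Spec_decrypt text n (decrypt text n)

-- ===== LEMMAS AND PROOFS =====

-- the one-step position map: after one step of A, position j holds the char that was at permF ndx j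
def permF (ndx j : Nat) : Nat := if j % 2 = 0 then ndx + j / 2 else j / 2

lemma permF_lt (L k j : Nat) (hk : k = L / 2) (hj : j < L) : permF k j < L := by
  unfold permF; split <;> omega

-- interleave b a = b0,a0,b1,a1,…
def ilv : List Char → List Char → List Char
  | [], ys => ys
  | x :: xs, ys => x :: ilv ys xs
termination_by b a => b.length + a.length
decreasing_by simp; omega

lemma ilv_length : ∀ (b a : List Char), (ilv b a).length = b.length + a.length := by
  intro b a
  induction b, a using ilv.induct with
  | case1 ys => simp [ilv]
  | case2 x xs ys ih => simp [ilv, ih]; omega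

lemma ilv_getD (d : Char) :
    ∀ (a b : List Char), a.length ≤ b.length → b.length ≤ a.length + 1 →
      ∀ j, j < a.length + b.length →
      (ilv b a).getD j d = if j % 2 = 0 then b.getD (j / 2) d else a.getD (j / 2) d := by
  intro a
  induction a with
  | nil =>
    intro b h1 h2 j hj
    cases b with
    | nil => simp at hj
    | cons x xs =>
      simp only [List.length_cons, List.length_nil] at h1 h2 hj
      obtain rfl : xs = [] := List.eq_nil_of_length_eq_zero (by omega)
      obtain rfl : j = 0 := by omega
      simp [ilv]
  | cons a0 a' ih =>
    intro b h1 h2 j hj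
    cases b with
    | nil => simp at h1
    | cons b0 b' =>
      match j with
      | 0 => simp [ilv]
      | 1 => simp [ilv]
      | (k+2) =>
        have := ih b' (by simpa using h1) (by simpa using h2) k (by simp at hj ⊢; omega)
        simp only [ilv, List.getD_cons_succ]
        rw [this]
        have h2mod : (k+2) % 2 = k % 2 := by omega
        have h2div : (k+2) / 2 = k / 2 + 1 := by omega
        rw [h2mod, h2div]
        split <;> simp

-- the flatMap of single-char slices IS the interleaving
lemma flatMap_take1_eq_ilv :
    ∀ (a b : List Char), a.length ≤ b.length → b.length ≤ a.length + 1 →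
      (List.range (a.length + 1)).flatMap (fun i => (b.drop i).take 1 ++ (a.drop i).take 1)
        = ilv b a := by
  intro a
  induction a with
  | nil =>
    intro b h1 h2
    cases b with
    | nil => simp [ilv]
    | cons x xs =>
      simp only [List.length_cons, List.length_nil] at h1 h2
      obtain rfl : xs = [] := List.eq_nil_of_length_eq_zero (by omega)
      simp [ilv]
  | cons a0 a' ih =>
    intro b h1 h2
    cases b with
    | nil => simp at h1
    | cons b0 b' =>
      simp only [List.length_cons] at h1 h2
      rw [List.range_succ_eq_map]
      simp only [List.flatMap_cons, List.flatMap_map]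
      simp only [List.drop_succ_cons, List.drop_zero, List.take_succ_cons, List.take_zero,
        List.length_cons, Nat.succ_eq_add_one]
      rw [ih b' (by omega) (by omega)]
      simp [ilv]

-- A's step with ndx = ↑k is the interleaving of drop k and take k
lemma decryptStep_eq_ilv (k : Nat) (t : List Char) (hk : k = t.length / 2) :
    decryptStep (k : Int) t = ilv (t.drop k) (t.take k) := by
  unfold decryptStep
  simp only [PySem.List.slice_to_natCast, PySem.List.slice_from_natCast]
  rw [show ((k : Int) + 1) = ((k + 1 : Nat) : Int) by push_cast; ring]
  rw [PySem.List.pyRange_one]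
  simp only [Int.sub_zero, Int.toNat_natCast, List.flatMap_map]
  calc (List.range (k+1)).flatMap
        (fun i : Nat => PySem.List.slice (t.drop k) (some ((0:Int) + i)) (some ((0:Int) + i + 1))
          ++ PySem.List.slice (t.take k) (some ((0:Int) + i)) (some ((0:Int) + i + 1)))
      = (List.range (k+1)).flatMap
        (fun i : Nat => ((t.drop k).drop i).take 1 ++ ((t.take k).drop i).take 1) := by
        congr 1
        funext i
        rw [zero_add, show ((i : Int) + 1) = ((i + 1 : Nat) : Int) by push_cast; ring]
        rw [PySem.List.slice_natCast, PySem.List.slice_natCast]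
        simp
    _ = ilv (t.drop k) (t.take k) := by
        have hl : (t.take k).length = k := by simp; omega
        have := flatMap_take1_eq_ilv (t.take k) (t.drop k) (by simp; omega) (by simp; omega)
        rw [hl] at this
        exact this

lemma decryptStep_length (t : List Char) (k : Nat) (hk : k = t.length / 2) :
    (decryptStep (k : Int) t).length = t.length := by
  rw [decryptStep_eq_ilv k t hk, ilv_length]; simp; omega

lemma decryptStep_getD (t : List Char) (k : Nat) (hk : k = t.length / 2) (j : Nat)
    (hj : j < t.length) (d : Char) :
    (decryptStep (k : Int) t).getD j d = t.getD (permF k j) d := by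
  rw [decryptStep_eq_ilv k t hk]
  have htake : (t.take k).length = k := by simp; omega
  have hdrop : (t.drop k).length = t.length - k := by simp
  rw [ilv_getD d (t.take k) (t.drop k) (by omega) (by omega) j (by omega)]
  unfold permF
  split
  · rename_i he
    have hlt : j / 2 < t.length - k := by omega
    rw [List.getD_eq_getElem?_getD, List.getD_eq_getElem?_getD, List.getElem?_drop]
  · rename_i ho
    have hlt : j / 2 < k := by omega
    rw [List.getD_eq_getElem?_getD, List.getD_eq_getElem?_getD, List.getElem?_take_of_lt hlt]

lemma iter_step (t : List Char) (c : Nat) (d : Char) :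
    ((decryptStep ((t.length / 2 : Nat) : Int))^[c] t).length = t.length ∧
      ∀ j, j < t.length →
        ((decryptStep ((t.length / 2 : Nat) : Int))^[c] t).getD j d
          = t.getD ((permF (t.length / 2))^[c] j) d := by
  induction c with
  | zero => simp
  | succ c ih =>
    obtain ⟨ihlen, ihget⟩ := ih
    rw [Function.iterate_succ_apply']
    set s := (decryptStep ((t.length / 2 : Nat) : Int))^[c] t with hs
    have hk : t.length / 2 = s.length / 2 := by rw [ihlen]
    constructor
    · rw [decryptStep_length s _ hk, ihlen]
    · intro j hj
      rw [decryptStep_getD s _ hk j (by omega), ihget _ (permF_lt t.length _ j rfl hj)]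
      rw [Function.iterate_succ_apply]

lemma foldl_iterate {α β : Type} (g : α → α) (l : List β) (init : α) :
    l.foldl (fun t _ => g t) init = g^[l.length] init := by
  induction l generalizing init with
  | nil => rfl
  | cons x xs ih => simp [List.foldl_cons, ih, Function.iterate_succ_apply]

def arrOf (g : Nat → Nat) (L : Nat) : List Nat := (List.range L).map g

lemma comp_arrOf (g h : Nat → Nat) (L : Nat) (hh : ∀ j, j < L → h j < L) :
    composeArr (arrOf g L) (arrOf h L) = arrOf (g ∘ h) L := by
  unfold composeArr arrOf
  rw [List.map_map]
  apply List.map_congr_left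
  intro j hj
  simp only [Function.comp]
  rw [PySem.List.getD_map_range g L (h j) 0 (hh j (List.mem_range.mp hj))]

lemma iterate_two_mul (g : Nat → Nat) (c : Nat) : (g ∘ g)^[c] = g^[2 * c] := by
  have h2 : g ∘ g = g^[2] := by
    funext x
    simp [Function.iterate_succ_apply']
  rw [h2, ← Function.iterate_mul]

lemma binExp_arrOf :
    ∀ (m : Nat) (g h : Nat → Nat) (L : Nat), (∀ j, j < L → g j < L) → (∀ j, j < L → h j < L) →
      binExp (arrOf g L) (arrOf h L) m = arrOf (g^[m] ∘ h) L := by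
  intro m
  induction m using Nat.strong_induction_on with
  | _ m ih =>
    intro g h L hg hh
    rw [binExp]
    by_cases hm : m = 0
    · simp [hm]
    · simp only [hm, if_false]
      have hsq : composeArr (arrOf g L) (arrOf g L) = arrOf (g ∘ g) L := comp_arrOf g g L hg
      have hgh : composeArr (arrOf g L) (arrOf h L) = arrOf (g ∘ h) L := comp_arrOf g h L hh
      have hgg : ∀ j, j < L → (g ∘ g) j < L := fun j hj => hg _ (hg j hj)
      by_cases hpar : m % 2 = 1
      · rw [if_pos hpar, hgh, hsq,
          ih (m / 2) (by omega) (g ∘ g) (g ∘ h) L hgg (fun j hj => hg _ (hh j hj))]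
        congr 1
        funext j
        simp only [Function.comp_apply, iterate_two_mul]
        rw [show 2 * (m / 2) = m - 1 by omega, show g^[m] (h j) = g^[(m-1)+1] (h j) by congr 1; omega,
          Function.iterate_succ_apply]
      · rw [if_neg hpar, hsq, ih (m / 2) (by omega) (g ∘ g) h L hgg hh]
        congr 1
        funext j
        simp only [Function.comp_apply, iterate_two_mul]
        congr 1
        omega

-- ===== VERDICT (by name: the statement is the Claim_ definition above) =====
theorem decrypt_spec : Claim_equal_decrypt := by
  intro text n _
  show decrypt text n = decrypt_alt text n
  by_cases h : text = ""
  · simp [decrypt, decrypt_alt, h]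
  · unfold decrypt decrypt_alt
    rw [if_neg h, if_neg h]
    have hndx : PySem.Int.floordiv (PySem.Str.len text) 2 = ((text.toList.length / 2 : Nat) : Int) := by
      rw [PySem.Str.len_eq]
      exact_mod_cast PySem.Int.floordiv_natCast text.toList.length 2
    rw [hndx]
    dsimp only
    rw [foldl_iterate]
    rw [PySem.List.length_pyRange_one]
    have hbase : (List.range text.toList.length).map
        (fun j => if j % 2 = 0 then text.toList.length / 2 + j / 2 else j / 2)
        = arrOf (permF (text.toList.length / 2)) text.toList.length := rfl
    have hid : List.range text.toList.length = arrOf id text.toList.length := by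
      simp [arrOf]
    rw [hbase, hid, binExp_arrOf n.toNat (permF (text.toList.length / 2)) id text.toList.length
      (fun j hj => permF_lt text.toList.length _ j rfl hj) (fun j hj => hj)]
    congr 1
    set t := text.toList
    set c := (n - 0).toNat with hc
    have hc' : n.toNat = c := by omega
    rw [hc']
    obtain ⟨hlen, hget⟩ := iter_step t c ' '
    apply List.ext_getElem
    · rw [hlen]; simp [arrOf]
    · intro j h1 h2
      rw [← List.getD_eq_getElem _ ' ' h1, ← List.getD_eq_getElem _ ' ' h2]
      rw [hget j (by omega)]
      unfold arrOf
      rw [List.map_map]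
      rw [PySem.List.getD_map_range _ t.length j ' ' (by simp only [arrOf, List.length_map, List.length_range] at h2; omega)]
      simp
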